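-- pv_equiv track=rewrite | github.com/deepakgawade/python-course | arrays/problem_44.py | numberBrackets
-- ===== SOURCE A (Python) =====
-- def numberBrackets(s):
--
--     n=len(s)
--     count=0
--     maxcount=0
--
--     for i in range(n):
--
--         if s[i]=='(':
--             count+=1
--         elif s[i]==")":
--             maxcount=max(maxcount,count)
--             count-=1
--         else:
--             continue
--
--     return maxcount
-- ===== SOURCE B (Python) =====
-- def numberBrackets(s):
--     # pass 1: prefix-balance table; pass 2: reduce over closing-paren positions
--     bal = []
--     total = 0
--     for ch in s:
--         total += (ch == '(') - (ch == ')')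
--         bal.append(total)
--     return max([0] + [b + 1 for ch, b in zip(s, bal) if ch == ')'])
-- ===== Notes on version B (the rewrite author's own statement) =====
-- stated objective: alternative
-- what changed: Replaces A's single interleaved loop carrying (count, maxcount) with two separated passes: one builds a full prefix-balance table, and a second comprehension reduces max over balance+1 at the closing-paren positions only.
import Mathlib
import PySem

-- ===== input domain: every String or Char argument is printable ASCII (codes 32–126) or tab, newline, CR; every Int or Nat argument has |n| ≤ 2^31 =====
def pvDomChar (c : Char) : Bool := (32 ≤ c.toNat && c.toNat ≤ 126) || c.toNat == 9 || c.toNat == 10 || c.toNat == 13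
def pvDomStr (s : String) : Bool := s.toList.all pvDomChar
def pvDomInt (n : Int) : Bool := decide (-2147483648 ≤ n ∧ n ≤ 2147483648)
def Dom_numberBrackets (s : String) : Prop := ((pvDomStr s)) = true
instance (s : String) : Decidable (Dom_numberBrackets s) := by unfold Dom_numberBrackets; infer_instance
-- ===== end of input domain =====

-- B is an alternative decomposition (prefix-balance table + reduce over closing positions), not faster.
-- ===== PORT A =====
-- A's loop over indices, carrying (count, maxcount), as structural recursion over the characters
def numberBracketsGo : List Char → Int → Int → Int
  | [], _, maxcount => maxcount
  | ch :: t, count, maxcount =>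
    if ch = '(' then numberBracketsGo t (count + 1) maxcount
    else if ch = ')' then numberBracketsGo t (count - 1) (max maxcount count)
    else numberBracketsGo t count maxcount

def numberBrackets (s : String) : Int := numberBracketsGo s.toList 0 0

-- ===== PORT B =====
-- pass 1 of Source B: the running-balance table (bal.append(total) loop)
def accumBal : List Char → Int → List Int
  | [], _ => []
  | ch :: t, total =>
    let total' := total + ((if ch = '(' then (1:Int) else 0) - (if ch = ')' then (1:Int) else 0))
    total' :: accumBal t total'

def numberBrackets_alt (s : String) : Int :=
  let l := s.toList
  let bal := accumBal l 0
  let vals := (l.zip bal).filterMap (fun p => if p.1 = ')' then some (p.2 + 1) else none)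
  -- max([0] + vals): max of a list starting with 0 = fold of max from 0
  vals.foldl max 0

-- ===== PRECONDITION & SPEC =====
def Spec_numberBrackets (s : String) (out : Int) : Prop := out = numberBrackets_alt s
instance (s : String) (out : Int) : Decidable (Spec_numberBrackets s out) := by unfold Spec_numberBrackets; infer_instance

-- ===== CLAIM (what is proved, stated in full; the proofs are below) =====
def Claim_equal_numberBrackets : Prop := ∀ (s : String), Dom_numberBrackets s → Spec_numberBrackets s (numberBrackets s)

-- ===== LEMMAS AND PROOFS =====
lemma goA_eq_fold (l : List Char) : ∀ (c m : Int),
    numberBracketsGo l c m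
      = ((l.zip (accumBal l c)).filterMap
          (fun p => if p.1 = ')' then some (p.2 + 1) else none)).foldl max m := by
  induction l with
  | nil => intro c m; simp [numberBracketsGo, accumBal]
  | cons ch t ih =>
    intro c m
    by_cases h1 : ch = '('
    · simp [numberBracketsGo, accumBal, h1, ih]
    · by_cases h2 : ch = ')'
      · simp [numberBracketsGo, accumBal, h2, ih, sub_eq_add_neg]
      · simp [numberBracketsGo, accumBal, h1, h2, ih]

-- ===== VERDICT (by name: the statement is the Claim_ definition above) =====
theorem numberBrackets_spec : Claim_equal_numberBrackets := by
  intro s _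
  unfold Spec_numberBrackets numberBrackets numberBrackets_alt
  simp [goA_eq_fold]
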